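-- pv_equiv track=rewrite | github.com/hamidatb/AutoExec | run_tests.py | _count_tests_passed
-- ===== SOURCE A (Python) =====
-- def _count_tests_passed(output: str) -> int:
--     """Count the number of tests that passed."""
--     lines = output.split('\n')
--     for line in lines:
--         # Look for summary line like "=================== 15 failed, 10 passed, 1 warning in 0.97s ==================="
--         if 'passed' in line and ('failed' in line or 'warnings' in line or 'warning' in line):
--             # Extract number from line like "=================== 15 failed, 10 passed, 1 warning in 0.97s ==================="
--             # Remove the = characters and split
--             clean_line = line.strip('=')
--             parts = clean_line.split()
--             for i, part in enumerate(parts):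
--                 if part == 'passed' or part == 'passed,':
--                     try:
--                         return int(parts[i-1])
--                     except (ValueError, IndexError):
--                         pass
--     return 0
-- ===== SOURCE B (Python) =====
-- def _count_tests_passed(output: str) -> int:
--     """Count the number of tests that passed."""
--     # Stream each summary line character by character, keeping only the word
--     # being built and the word completed just before it; when a completed word
--     # is the 'passed' marker, the remembered previous word is the count.
--     for line in output.split('\n'):
--         if 'passed' in line and ('failed' in line or 'warnings' in line or 'warning' in line):
--             prev = None
--             word = ''
--             for ch in line.strip('=') + ' ':
--                 if ch.isspace():
--                     if word:
--                         if word in ('passed', 'passed,') and prev is not None: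
--                             try:
--                                 return int(prev)
--                             except ValueError:
--                                 pass
--                         prev, word = word, ''
--                 else:
--                     word += ch
--     return 0
-- ===== Notes on version B (the rewrite author's own statement) =====
-- stated objective: alternative
-- what changed: Replaces A's tokenize-then-index pipeline (split into a token list, enumerate, look back with parts[i-1] under try/except) by a streaming character-level state machine: each qualifying line is scanned once, maintaining only the word being built and the previously completed word, and the remembered previous word is parsed when a 'passed' marker word completes; …
-- outside the precondition, e.g. on _count_tests_passed('passed, 3 failed 7'): A returns 7, B returns 0
import Mathlib
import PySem

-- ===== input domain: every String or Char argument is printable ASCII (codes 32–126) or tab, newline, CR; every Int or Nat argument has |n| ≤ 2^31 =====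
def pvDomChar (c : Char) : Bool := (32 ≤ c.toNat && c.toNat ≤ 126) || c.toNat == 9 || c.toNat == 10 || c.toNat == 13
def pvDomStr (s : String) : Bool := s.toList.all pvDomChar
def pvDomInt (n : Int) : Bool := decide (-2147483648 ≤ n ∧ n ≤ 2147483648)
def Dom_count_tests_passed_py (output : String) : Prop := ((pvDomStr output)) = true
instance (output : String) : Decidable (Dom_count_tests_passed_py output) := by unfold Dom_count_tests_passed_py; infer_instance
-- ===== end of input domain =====

-- B replaces A's tokenize-then-index pipeline (split, enumerate, parts[i-1] under try/except)
-- by a streaming character-level state machine over each qualifying line: it keeps only the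
-- word being built and the previously completed word, and parses the remembered previous word
-- when a 'passed' marker word completes; a line-initial marker has no previous word (see D_).

-- shared vocabulary (each Python repeats these expressions inline)
def pvGuard (line : String) : Bool :=
  PySem.Str.isIn "passed" line &&
    (PySem.Str.isIn "failed" line || PySem.Str.isIn "warnings" line || PySem.Str.isIn "warning" line)

def pvPassedTok (s : String) : Bool := s == "passed" || s == "passed,"

-- output.split('\n'); the separator "\n" is non-empty, so split? is always some
def pvLines (output : String) : List String :=
  (PySem.Str.split? output "\n").getD []

-- ===== PORT A =====
-- clean_line = line.strip('='); parts = clean_line.split()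
def pvParts (line : String) : List String :=
  PySem.Str.split₀ (PySem.Str.stripChars line "=")

-- inner loop: 'for i, part in enumerate(parts): …' (return ↦ some, fall through ↦ none)
def pvAInner (parts : List String) : List String → Nat → Option Int
  | [], _ => none
  | part :: rs, i =>
    if pvPassedTok part then
      match PySem.List.pyGet? parts ((i : Int) - 1) with
      | some prev =>
        match PySem.Int.ofStr? prev with
        | some n => some n
        | none => pvAInner parts rs (i + 1)      -- ValueError: pass
      | none => pvAInner parts rs (i + 1)        -- IndexError: pass
    else pvAInner parts rs (i + 1)

-- outer loop: 'for line in lines: …', final 'return 0'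
def pvALines : List String → Int
  | [] => 0
  | line :: ls =>
    if pvGuard line then
      match pvAInner (pvParts line) (pvParts line) 0 with
      | some n => n
      | none => pvALines ls
    else pvALines ls

def count_tests_passed_py (output : String) : Int :=
  pvALines (pvLines output)

-- ===== PORT B =====
-- inner loop: 'for ch in line.strip('=') + ' ': …' with state (prev, word)
-- (return ↦ some, fall through ↦ none)
def pvScan : List Char → Option (List Char) → List Char → Option Int
  | [], _, _ => none
  | c :: rest, prev, word =>
    if PySem.Chars.isspace c then
      if word.isEmpty then pvScan rest prev word
      else
        if word == "passed".toList || word == "passed,".toList then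
          match prev with
          | some p =>
            match PySem.Int.ofChars? p with
            | some n => some n                       -- return int(prev)
            | none => pvScan rest (some word) []     -- ValueError: pass
          | none => pvScan rest (some word) []       -- prev is None: not a candidate
        else pvScan rest (some word) []              -- prev, word = word, ''
    else pvScan rest prev (word ++ [c])              -- word += ch

-- outer loop: 'for line in output.split('\n'): …', final 'return 0'
def pvBLines : List String → Int
  | [] => 0
  | line :: ls =>
    if pvGuard line then
      match pvScan ((PySem.Str.stripChars line "=").toList ++ [' ']) none [] with
      | some n => n
      | none => pvBLines ls
    else pvBLines ls

def count_tests_passed_py_alt (output : String) : Int :=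
  pvBLines (pvLines output)

-- ===== PRECONDITION & SPEC =====
-- Pre_ excludes outputs where some qualifying summary line begins (after stripping '=') with
-- the token 'passed'/'passed,' and also ends with an int-parsable token: a line-initial marker
-- has no preceding count, so no particular return value is specified there — A reads the
-- line's LAST token (parts[i-1] at index 0 is parts[-1]), B skips the marker; both are
-- readings of an unspecified corner.
def pvBadLine (line : String) : Bool :=
  pvGuard line &&
    (match pvParts line with
     | [] => false
     | p :: rs => pvPassedTok p && ((p :: rs).getLast?.any fun t => (PySem.Int.ofStr? t).isSome))

def Pre_count_tests_passed_py (output : String) : Prop :=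
  (pvLines output).any pvBadLine = false
instance (output : String) : Decidable (Pre_count_tests_passed_py output) := by
  unfold Pre_count_tests_passed_py; infer_instance

def pvWitness_count_tests_passed_py : String := "=== 2 failed, 5 passed, 1 warning in 0.97s ==="

def Spec_count_tests_passed_py (output : String) (out : Int) : Prop :=
  out = count_tests_passed_py_alt output
instance (output : String) (out : Int) : Decidable (Spec_count_tests_passed_py output out) := by
  unfold Spec_count_tests_passed_py; infer_instance

-- ===== CLAIM (what is proved, stated in full; the proofs are below) =====
def Claim_equal_count_tests_passed_py : Prop := ∀ (output : String), Dom_count_tests_passed_py output → Pre_count_tests_passed_py output → Spec_count_tests_passed_py output (count_tests_passed_py output)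

-- ===== LEMMAS AND PROOFS =====

-- the common token-level skeleton both per-line loops reduce to: walk the tokens remembering
-- the previous one; at a marker token, the first previous token that parses is the answer
def pvTok : Option (List Char) → List (List Char) → Option Int
  | _, [] => none
  | prev, t :: ts =>
    if t == "passed".toList || t == "passed,".toList then
      match prev with
      | some p =>
        match PySem.Int.ofChars? p with
        | some n => some n
        | none => pvTok (some t) ts
      | none => pvTok (some t) ts
    else pvTok (some t) ts

-- the tokenizer's accumulator only prepends already-finished tokens
lemma pvGo_acc (cs : List Char) : ∀ (cur : List Char) (acc : List (List Char)),
    PySem.Chars.split₀.go cs cur acc = acc.reverse ++ PySem.Chars.split₀.go cs cur [] := by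
  induction cs with
  | nil =>
    intro cur acc
    by_cases h : cur.isEmpty <;> simp [PySem.Chars.split₀.go, h]
  | cons c rest ih =>
    intro cur acc
    by_cases hs : PySem.Chars.isspace c
    · by_cases h : cur.isEmpty
      · simp only [PySem.Chars.split₀.go, hs, h, if_true]
        exact ih [] acc
      · simp only [PySem.Chars.split₀.go, hs, h, if_true, Bool.false_eq_true, if_false]
        rw [ih [] (cur.reverse :: acc), ih [] [cur.reverse]]
        simp
    · simp only [PySem.Chars.split₀.go, hs, Bool.false_eq_true, if_false]
      exact ih (c :: cur) acc

-- B's character scanner is pvTok over the tokens of the remaining text (word = current partial token)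
lemma pvScan_eq (cs : List Char) : ∀ (prev : Option (List Char)) (word : List Char),
    pvScan (cs ++ [' ']) prev word = pvTok prev (PySem.Chars.split₀.go cs word.reverse []) := by
  induction cs with
  | nil =>
    intro prev word
    have hsp : PySem.Chars.isspace ' ' = true := by decide
    simp only [List.nil_append, pvScan, PySem.Chars.split₀.go, hsp, if_true,
      List.isEmpty_reverse, List.reverse_reverse]
    by_cases h : word.isEmpty
    · simp [h, pvTok]
    · simp only [h, Bool.false_eq_true, if_false]
      cases prev with
      | none => simp [pvTok]
      | some p => cases hparse : PySem.Int.ofChars? p with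
        | some n => simp [pvTok, hparse]
        | none => simp [pvTok, hparse]
  | cons c rest ih =>
    intro prev word
    simp only [List.cons_append, pvScan, PySem.Chars.split₀.go]
    by_cases hs : PySem.Chars.isspace c
    · simp only [hs, if_true, List.isEmpty_reverse]
      by_cases h : word.isEmpty
      · simp only [h, if_true]
        rw [List.isEmpty_iff.mp h]
        simpa using ih prev []
      · simp only [h, Bool.false_eq_true, if_false, List.reverse_reverse]
        rw [pvGo_acc rest [] [word]]
        simp only [List.reverse_singleton, List.singleton_append]
        cases prev with
        | none =>
          simp only [pvTok]
          split_ifs <;> simpa using ih (some word) []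
        | some p =>
          cases hparse : PySem.Int.ofChars? p with
          | some n =>
            simp only [pvTok, hparse]
            split_ifs
            · rfl
            · simpa using ih (some word) []
          | none =>
            simp only [pvTok, hparse]
            split_ifs <;> simpa using ih (some word) []
    · simp only [hs, Bool.false_eq_true, if_false]
      simpa using ih prev (word ++ [c])

-- marker test on strings vs on their character lists
lemma pvMarker_toList (s : String) :
    (s.toList == "passed".toList || s.toList == "passed,".toList) = pvPassedTok s := by
  rw [Bool.eq_iff_iff]
  simp only [pvPassedTok, Bool.or_eq_true, beq_iff_eq, String.toList_inj]

-- A's inner loop from index i ≥ 1 is pvTok with prev = the (i-1)-st token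
lemma pvInner_eq (parts : List String) :
    ∀ (rest : List String) (i : Nat), parts.drop i = rest → 1 ≤ i →
      pvAInner parts rest i =
        pvTok (some (parts.getD (i - 1) "").toList) (rest.map String.toList) := by
  intro rest
  induction rest with
  | nil => intro i _ _; simp [pvAInner, pvTok]
  | cons cur rs ih =>
    intro i hdrop hi
    have hlen : i < parts.length := by
      by_contra h
      simp [List.drop_eq_nil_of_le (Nat.le_of_not_lt h)] at hdrop
    have hlen1 : i - 1 < parts.length := lt_of_le_of_lt (Nat.sub_le _ _) hlen
    have hdrop' : parts.drop (i + 1) = rs := by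
      have h := congrArg (List.drop 1) hdrop
      rw [List.drop_drop] at h
      simpa [Nat.add_comm] using h
    have ih' := ih (i + 1) hdrop' (by omega)
    have hget : PySem.List.pyGet? parts ((i : Nat) - 1 : Int) = some (parts.getD (i - 1) "") := by
      have h1 : ((i : Nat) - 1 : Int) = ((i - 1 : Nat) : Int) := by omega
      rw [h1, PySem.List.pyGet?_natCast]
      simp [hlen1, List.getD_eq_getElem?_getD]
    simp only [List.map_cons, pvAInner, pvTok, pvMarker_toList]
    have hcurget : (parts.getD (i + 1 - 1) "") = cur := by
      have : parts[i] = cur := by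
        have := congrArg List.head? hdrop
        simpa [List.head?_drop, List.getElem?_eq_getElem hlen] using this
      simp [List.getD_eq_getElem?_getD, List.getElem?_eq_getElem hlen, this]
    rw [hcurget] at ih'
    by_cases hp : pvPassedTok cur
    · simp only [hp, if_true, hget]
      rw [show PySem.Int.ofStr? (parts.getD (i - 1) "") =
            PySem.Int.ofChars? (parts.getD (i - 1) "").toList from rfl]
      cases h : PySem.Int.ofChars? (parts.getD (i - 1) "").toList with
      | some n => rfl
      | none => exact ih'
    · simp only [hp, Bool.false_eq_true, if_neg, not_false_iff]
      exact ih'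

-- per-line: outside the bad case, A's indexed scan and B's streaming scan agree
lemma pvLine_eq (line : String) (hline : pvGuard line) (hnb : pvBadLine line = false) :
    pvAInner (pvParts line) (pvParts line) 0 =
      pvScan ((PySem.Str.stripChars line "=").toList ++ [' ']) none [] := by
  rw [pvScan_eq]
  have hgo : PySem.Chars.split₀.go (PySem.Str.stripChars line "=").toList [] [] =
      (pvParts line).map String.toList := by
    unfold pvParts
    rw [PySem.Str.split₀_map_toList]
    rfl
  simp only [List.reverse_nil, hgo]
  simp only [pvBadLine, hline, Bool.true_and] at hnb
  cases hps : pvParts line with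
  | nil => simp [pvAInner, pvTok]
  | cons p rs =>
    rw [hps] at hnb
    have hinner := pvInner_eq (p :: rs) rs 1 (by simp) (le_refl 1)
    simp only [show (1:Nat) - 1 = 0 from rfl, List.getD_cons_zero] at hinner
    simp only [List.map_cons, pvAInner, pvTok, pvMarker_toList]
    by_cases hp : pvPassedTok p
    · have h0 : ((0 : Nat) : Int) - 1 = -1 := by norm_num
      rw [h0, PySem.List.pyGet?_neg_one]
      have hgl : (p :: rs).getLast? = some ((p :: rs).getLast (by simp)) :=
        List.getLast?_eq_some_getLast _
      have hnone : PySem.Int.ofStr? ((p :: rs).getLast (by simp)) = none := by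
        simp only [hp, hgl, Bool.true_and, Option.any_some] at hnb
        exact Option.not_isSome_iff_eq_none.mp (by simp [hnb])
      rw [hgl]
      simp only [hp, if_true, hnone]
      exact hinner
    · simp only [hp, Bool.false_eq_true, if_neg, not_false_iff]
      exact hinner

-- the outer loops agree line by line
lemma pvLines_eq (lines : List String) (h : lines.any pvBadLine = false) :
    pvALines lines = pvBLines lines := by
  induction lines with
  | nil => rfl
  | cons line ls ih =>
    simp only [List.any_cons, Bool.or_eq_false_iff] at h
    by_cases hg : pvGuard line
    · simp only [pvALines, pvBLines, hg, if_true]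
      rw [pvLine_eq line hg h.1]
      cases pvScan ((PySem.Str.stripChars line "=").toList ++ [' ']) none [] with
      | some n => rfl
      | none => exact ih h.2
    · simp only [pvALines, pvBLines, hg, Bool.false_eq_true, if_false]
      exact ih h.2

-- ===== VERDICT (by name: the statement is the Claim_ definition above) =====
theorem count_tests_passed_py_spec : Claim_equal_count_tests_passed_py := by
  intro output _ hpre
  unfold Spec_count_tests_passed_py count_tests_passed_py count_tests_passed_py_alt
  exact pvLines_eq _ hpre
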